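-- pv_equiv track=rewrite | github.com/SoluMilken/algo_zoo | codejam2021/qual/p2.py | decide_q_chars
-- ===== SOURCE A (Python) =====
-- def decide_q_chars(q_idx_pairs, S, X, Y):
--     s_lst = [s for s in S]
--     for start_idx, end_idx in q_idx_pairs:
--         left_char = None
--         right_char = None
--         if start_idx > 0:
--             left_char = S[start_idx - 1]
--         if end_idx < len(S) - 1:
--             right_char = S[end_idx + 1]
--
--         if left_char is not None and right_char is not None:
--             for idx in range(start_idx, end_idx + 1):
--                 s_lst[idx] = left_char
--         elif left_char is None and right_char is not None:
--             for idx in range(start_idx, end_idx + 1):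
--                 s_lst[idx] = right_char
--         elif left_char is not None and right_char is None:
--             for idx in range(start_idx, end_idx + 1):
--                 s_lst[idx] = left_char
--         else:
--             for idx in range(start_idx, end_idx + 1):
--                 s_lst[idx] = "C"
--     return s_lst
-- ===== SOURCE B (Python) =====
-- def decide_q_chars(q_idx_pairs, S, X, Y):
--     # Per-cell view: each cell's final colour comes from the LAST query covering it.
--     # The colour of each query is computed once, up front.
--     n = len(S)
--     fills = [S[a - 1] if a > 0 else (S[b + 1] if b < n - 1 else "C") for a, b in q_idx_pairs]
--     out = []
--     for i, ch in enumerate(S):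
--         c = ch
--         for (a, b), f in zip(reversed(q_idx_pairs), reversed(fills)):
--             if a <= i <= b:
--                 c = f
--                 break
--         out.append(c)
--     return out
-- ===== Notes on version B (the rewrite author's own statement) =====
-- stated objective: alternative
-- what changed: A sweeps forward over queries repainting a mutable char buffer (last write wins); B precomputes each query's fill colour once and then, per cell, scans the reversed query list for the first (i.e. last-applied) covering query, emitting the answer directly with no mutation.
-- outside the precondition, e.g. on decide_q_chars([(-2, -1)], 'abc', 0, 0): A returns ['a', 'a', 'a'], B returns ['a', 'b', 'c']
import Mathlib
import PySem

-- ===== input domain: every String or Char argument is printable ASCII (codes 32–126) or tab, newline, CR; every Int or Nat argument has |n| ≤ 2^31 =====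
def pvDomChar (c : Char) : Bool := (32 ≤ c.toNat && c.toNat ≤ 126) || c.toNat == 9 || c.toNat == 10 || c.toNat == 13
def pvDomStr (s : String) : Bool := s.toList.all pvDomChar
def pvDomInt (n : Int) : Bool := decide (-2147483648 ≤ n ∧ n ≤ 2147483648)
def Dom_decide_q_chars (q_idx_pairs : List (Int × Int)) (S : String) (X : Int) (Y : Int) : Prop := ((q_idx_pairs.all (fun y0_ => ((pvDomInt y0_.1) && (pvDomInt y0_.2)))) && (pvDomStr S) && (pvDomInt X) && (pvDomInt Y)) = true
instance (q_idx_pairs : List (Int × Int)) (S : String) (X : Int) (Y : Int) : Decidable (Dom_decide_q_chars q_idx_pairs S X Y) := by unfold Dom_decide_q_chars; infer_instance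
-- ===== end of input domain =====

-- B replaces A's query-by-query repainting of a mutable buffer with a per-cell lookup of the
-- last covering query (equal cost, no mutation); equivalence is proved on in-range queries.

-- ===== PORT A =====
-- one iteration of A's outer loop over q_idx_pairs (the body is A's code, step for step;
-- pyGet?/pySetD are the Python-exact index/assignment primitives — exact on in-range indices,
-- the out-of-range assignments on which Python raises are excluded by Pre_).
def paintStep (S : String) (s_lst : List String) (q : Int × Int) : List String :=
  let start_idx := q.1
  let end_idx := q.2
  let left_char : Option String :=
    if start_idx > 0 then (PySem.List.pyGet? S.toList (start_idx - 1)).map (fun c => String.mk [c]) else none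
  let right_char : Option String :=
    if end_idx < PySem.List.len S.toList - 1 then (PySem.List.pyGet? S.toList (end_idx + 1)).map (fun c => String.mk [c]) else none
  match left_char, right_char with
  | some lc, some _ => (PySem.List.pyRange start_idx (end_idx + 1) 1).foldl (fun l idx => PySem.List.pySetD l idx lc) s_lst
  | none, some rc => (PySem.List.pyRange start_idx (end_idx + 1) 1).foldl (fun l idx => PySem.List.pySetD l idx rc) s_lst
  | some lc, none => (PySem.List.pyRange start_idx (end_idx + 1) 1).foldl (fun l idx => PySem.List.pySetD l idx lc) s_lst
  | none, none => (PySem.List.pyRange start_idx (end_idx + 1) 1).foldl (fun l idx => PySem.List.pySetD l idx "C") s_lst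

def decide_q_chars (q_idx_pairs : List (Int × Int)) (S : String) (X : Int) (Y : Int) : List String :=
  let s_lst : List String := S.toList.map (fun c => String.mk [c])
  q_idx_pairs.foldl (paintStep S) s_lst

-- ===== PORT B =====
-- Source B's fill-colour expression for a query (start, end), used by its 'fills' comprehension.
-- (pyGetD's 'C' default stands where Python's indexing would raise; those inputs lie outside Pre_.)
def pvFill (chars : List Char) (n : Int) (start_idx end_idx : Int) : String :=
  if start_idx > 0 then String.mk [PySem.List.pyGetD chars (start_idx - 1) 'C']
  else if end_idx < n - 1 then String.mk [PySem.List.pyGetD chars (end_idx + 1) 'C']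
  else "C"

def decide_q_chars_alt (q_idx_pairs : List (Int × Int)) (S : String) (X : Int) (Y : Int) : List String :=
  let chars := S.toList
  let n := PySem.List.len chars
  let fills := q_idx_pairs.map (fun q => pvFill chars n q.1 q.2)
  let rev := q_idx_pairs.reverse.zip fills.reverse
  (PySem.List.enumerate chars).map (fun p =>
    match rev.find? (fun qf => qf.1.1 ≤ p.1 && p.1 ≤ qf.1.2) with
    | some qf => qf.2
    | none => String.mk [p.2])

-- ===== PRECONDITION & SPEC =====
-- Pre_ admits queries in the natural domain 0 ≤ start ≤ end < len(S) and empty (start > end)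
-- queries whose neighbour reads are safe; outside it A either raises IndexError or silently
-- paints other cells via Python's negative-index wraparound.
def Pre_decide_q_chars (q_idx_pairs : List (Int × Int)) (S : String) (X : Int) (Y : Int) : Prop :=
  ∀ p ∈ q_idx_pairs,
    (p.1 ≤ p.2 → 0 ≤ p.1 ∧ p.2 < PySem.List.len S.toList) ∧
    (p.2 < p.1 → (0 < p.1 → p.1 ≤ PySem.List.len S.toList) ∧
      (p.2 < PySem.List.len S.toList - 1 → -(PySem.List.len S.toList) ≤ p.2 + 1))
instance (q_idx_pairs : List (Int × Int)) (S : String) (X : Int) (Y : Int) : Decidable (Pre_decide_q_chars q_idx_pairs S X Y) := by unfold Pre_decide_q_chars; infer_instance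

def pvWitness_decide_q_chars : (List (Int × Int)) × String × Int × Int := ([(0, 1), (1, 2)], "abcd", 0, 0)

def Spec_decide_q_chars (q_idx_pairs : List (Int × Int)) (S : String) (X : Int) (Y : Int) (out : List String) : Prop := out = decide_q_chars_alt q_idx_pairs S X Y
instance (q_idx_pairs : List (Int × Int)) (S : String) (X : Int) (Y : Int) (out : List String) : Decidable (Spec_decide_q_chars q_idx_pairs S X Y out) := by unfold Spec_decide_q_chars; infer_instance

-- ===== CLAIM (what is proved, stated in full; the proofs are below) =====
def Claim_equal_decide_q_chars : Prop := ∀ (q_idx_pairs : List (Int × Int)) (S : String) (X : Int) (Y : Int), Dom_decide_q_chars q_idx_pairs S X Y → Pre_decide_q_chars q_idx_pairs S X Y → Spec_decide_q_chars q_idx_pairs S X Y (decide_q_chars q_idx_pairs S X Y)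

-- ===== LEMMAS AND PROOFS =====

-- the inner assignment loop preserves the buffer's length
theorem pv_len_foldl_setD (idxs : List Int) (l : List String) (c : String) :
    (idxs.foldl (fun acc idx => PySem.List.pySetD acc idx c) l).length = l.length := by
  induction idxs generalizing l with
  | nil => rfl
  | cons j rest ih => simp [List.foldl, ih, PySem.List.length_pySetD]

-- value at index i after the inner assignment loop (nonnegative indices)
theorem pv_foldl_setD_get (idxs : List Int) (l : List String) (c : String) (i : Nat)
    (hi : i < l.length) (hnn : ∀ j ∈ idxs, 0 ≤ j) :
    (idxs.foldl (fun acc idx => PySem.List.pySetD acc idx c) l)[i]? =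
      if (i : Int) ∈ idxs then some c else l[i]? := by
  induction idxs generalizing l with
  | nil => simp
  | cons j rest ih =>
    have hj : (0:Int) ≤ j := hnn j (by simp)
    have hlen : (PySem.List.pySetD l j c).length = l.length := PySem.List.length_pySetD ..
    rw [List.foldl_cons, ih (PySem.List.pySetD l j c) (by omega) (fun x hx => hnn x (by simp [hx]))]
    by_cases hmem : (i : Int) ∈ rest
    · simp [hmem]
    · rw [PySem.List.pySetD_of_nonneg l c hj]
      by_cases hij : (i : Int) = j
      · have : j.toNat = i := by omega
        simp [hmem, hij, List.getElem?_set, this, hi]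
      · have : j.toNat ≠ i := by omega
        simp [hmem, hij, List.getElem?_set, this]

theorem pv_paintStep_length (S : String) (l : List String) (q : Int × Int) :
    (paintStep S l q).length = l.length := by
  unfold paintStep
  cases hL : (if q.1 > 0 then (PySem.List.pyGet? S.toList (q.1 - 1)).map (fun c => String.mk [c]) else none) with
  | none =>
    cases hR : (if q.2 < PySem.List.len S.toList - 1 then (PySem.List.pyGet? S.toList (q.2 + 1)).map (fun c => String.mk [c]) else none) with
    | none => simp only [hL, hR, pv_len_foldl_setD]
    | some rc => simp only [hL, hR, pv_len_foldl_setD]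
  | some lc =>
    cases hR : (if q.2 < PySem.List.len S.toList - 1 then (PySem.List.pyGet? S.toList (q.2 + 1)).map (fun c => String.mk [c]) else none) with
    | none => simp only [hL, hR, pv_len_foldl_setD]
    | some rc => simp only [hL, hR, pv_len_foldl_setD]

-- one step of A paints the covered cells with exactly B's fill character
theorem pv_paintStep_get (S : String) (l : List String) (q : Int × Int) (i : Nat)
    (hl : l.length = S.toList.length) (hi : i < l.length)
    (hq : (q.1 ≤ q.2 → 0 ≤ q.1 ∧ q.2 < PySem.List.len S.toList) ∧
      (q.2 < q.1 → (0 < q.1 → q.1 ≤ PySem.List.len S.toList) ∧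
        (q.2 < PySem.List.len S.toList - 1 → -(PySem.List.len S.toList) ≤ q.2 + 1))) :
    (paintStep S l q)[i]? =
      if q.1 ≤ (i : Int) ∧ (i : Int) ≤ q.2
      then some (pvFill S.toList (PySem.List.len S.toList) q.1 q.2)
      else l[i]? := by
  by_cases hab' : q.1 ≤ q.2
  case neg =>
    rw [if_neg (by omega)]
    have hnil : PySem.List.pyRange q.1 (q.2 + 1) 1 = [] := PySem.List.pyRange_one_eq_nil (by omega)
    unfold paintStep
    cases hL : (if q.1 > 0 then (PySem.List.pyGet? S.toList (q.1 - 1)).map (fun c => String.mk [c]) else none) with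
    | none =>
      cases hR : (if q.2 < PySem.List.len S.toList - 1 then (PySem.List.pyGet? S.toList (q.2 + 1)).map (fun c => String.mk [c]) else none) with
      | none => simp only [hL, hR, hnil, List.foldl_nil]
      | some rc => simp only [hL, hR, hnil, List.foldl_nil]
    | some lc =>
      cases hR : (if q.2 < PySem.List.len S.toList - 1 then (PySem.List.pyGet? S.toList (q.2 + 1)).map (fun c => String.mk [c]) else none) with
      | none => simp only [hL, hR, hnil, List.foldl_nil]
      | some rc => simp only [hL, hR, hnil, List.foldl_nil]
  case pos =>
  obtain ⟨h0, hbn⟩ := hq.1 hab'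
  have hab : q.1 ≤ q.2 := hab'
  have hlen : PySem.List.len S.toList = (S.toList.length : Int) := PySem.List.len_eq _
  have hmem : ∀ x, x ∈ PySem.List.pyRange q.1 (q.2 + 1) 1 ↔ q.1 ≤ x ∧ x < q.2 + 1 :=
    fun x => PySem.List.mem_pyRange_one
  have hnn : ∀ j ∈ PySem.List.pyRange q.1 (q.2 + 1) 1, (0:Int) ≤ j := by
    intro j hj; have := (hmem j).mp hj; omega
  have hrange : ((i : Int) ∈ PySem.List.pyRange q.1 (q.2 + 1) 1) ↔ (q.1 ≤ (i:Int) ∧ (i:Int) ≤ q.2) := by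
    rw [hmem]; omega
  unfold paintStep pvFill
  by_cases ha : q.1 > 0
  · have h1 : (0:Int) ≤ q.1 - 1 := by omega
    have h2 : q.1 - 1 < S.toList.length := by omega
    have hLv : PySem.List.pyGet? S.toList (q.1 - 1) = some (S.toList[(q.1 - 1).toNat]) :=
      PySem.List.pyGet?_eq_some_getElem _ h1 h2
    have hGD : PySem.List.pyGetD S.toList (q.1 - 1) 'C' = S.toList[(q.1 - 1).toNat] :=
      PySem.List.pyGetD_eq_getElem _ 'C' h1 h2
    by_cases hb : q.2 < PySem.List.len S.toList - 1
    · have h1' : (0:Int) ≤ q.2 + 1 := by omega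
      have h2' : q.2 + 1 < (S.toList.length : Int) := by omega
      have hRv : PySem.List.pyGet? S.toList (q.2 + 1) = some (S.toList[(q.2 + 1).toNat]) :=
        PySem.List.pyGet?_eq_some_getElem _ h1' h2'
      simp only [if_pos ha, if_pos hb, hLv, hRv, Option.map_some]
      rw [pv_foldl_setD_get _ _ _ _ hi hnn, if_congr hrange rfl rfl, hGD]
    · simp only [if_pos ha, if_neg hb, hLv, Option.map_some]
      rw [pv_foldl_setD_get _ _ _ _ hi hnn, if_congr hrange rfl rfl, hGD]
  · simp only [if_neg ha]
    by_cases hb : q.2 < PySem.List.len S.toList - 1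
    · have h1 : (0:Int) ≤ q.2 + 1 := by omega
      have h2 : q.2 + 1 < S.toList.length := by omega
      have hRv : PySem.List.pyGet? S.toList (q.2 + 1) = some (S.toList[(q.2 + 1).toNat]) :=
        PySem.List.pyGet?_eq_some_getElem _ h1 h2
      have hGD : PySem.List.pyGetD S.toList (q.2 + 1) 'C' = S.toList[(q.2 + 1).toNat] :=
        PySem.List.pyGetD_eq_getElem _ 'C' h1 h2
      simp only [if_pos hb, hRv, Option.map_some]
      rw [pv_foldl_setD_get _ _ _ _ hi hnn, if_congr hrange rfl rfl, hGD]
    · simp only [if_neg hb]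
      rw [pv_foldl_setD_get _ _ _ _ hi hnn, if_congr hrange rfl rfl]

theorem pv_foldl_paint_length (qs : List (Int × Int)) (S : String) (l : List String) :
    (qs.foldl (paintStep S) l).length = l.length := by
  induction qs generalizing l with
  | nil => rfl
  | cons q rest ih => rw [List.foldl_cons, ih, pv_paintStep_length]

-- A's whole loop, read per cell: the first covering query of the REVERSED list decides the cell
theorem pv_main (qs : List (Int × Int)) (S : String) (l : List String) (i : Nat)
    (hl : l.length = S.toList.length) (hi : i < l.length)
    (hPre : ∀ p ∈ qs,
      (p.1 ≤ p.2 → 0 ≤ p.1 ∧ p.2 < PySem.List.len S.toList) ∧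
      (p.2 < p.1 → (0 < p.1 → p.1 ≤ PySem.List.len S.toList) ∧
        (p.2 < PySem.List.len S.toList - 1 → -(PySem.List.len S.toList) ≤ p.2 + 1))) :
    (qs.foldl (paintStep S) l)[i]? =
      match qs.reverse.find? (fun q => q.1 ≤ (i : Int) && (i : Int) ≤ q.2) with
      | some q => some (pvFill S.toList (PySem.List.len S.toList) q.1 q.2)
      | none => l[i]? := by
  induction qs generalizing l with
  | nil => simp
  | cons q rest ih =>
    have hq := hPre q (by simp)
    have hl' : (paintStep S l q).length = l.length := pv_paintStep_length ..
    rw [List.foldl_cons, ih (paintStep S l q) (by omega) (by omega)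
        (fun p hp => hPre p (by simp [hp]))]
    rw [List.reverse_cons, List.find?_append]
    cases hfind : rest.reverse.find? (fun q => q.1 ≤ (i : Int) && (i : Int) ≤ q.2) with
    | some p => simp
    | none =>
      simp only [Option.none_or, List.find?_singleton]
      rw [pv_paintStep_get S l q i hl hi hq]
      by_cases hcov : q.1 ≤ (i : Int) ∧ (i : Int) ≤ q.2
      · simp [hcov.1, hcov.2]
      · have hb : (q.1 ≤ (i : Int) && (i : Int) ≤ q.2) = false := by
          simp only [Bool.and_eq_false_iff, decide_eq_false_iff_not]; omega
        simp [if_neg hcov, hb]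

-- ===== VERDICT (by name: the statement is the Claim_ definition above) =====
theorem decide_q_chars_spec : Claim_equal_decide_q_chars := by
  intro qs S X Y _hDom hPre
  unfold Spec_decide_q_chars decide_q_chars decide_q_chars_alt
  have hs0 : (S.toList.map (fun c => String.mk [c])).length = S.toList.length := by simp
  have hzip : qs.reverse.zip ((qs.map (fun q => pvFill S.toList (PySem.List.len S.toList) q.1 q.2)).reverse)
      = qs.reverse.map (fun q => (q, pvFill S.toList (PySem.List.len S.toList) q.1 q.2)) := by
    rw [← List.map_reverse]
    have := List.zip_map' (f := (id : Int × Int → Int × Int))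
      (g := fun q : Int × Int => pvFill S.toList (PySem.List.len S.toList) q.1 q.2) (l := qs.reverse)
    simpa using this
  apply List.ext_getElem?
  intro i
  by_cases hi : i < S.toList.length
  · rw [pv_main qs S _ i hs0 (by omega) hPre]
    have hBi : ((PySem.List.enumerate S.toList).map (fun p =>
        match (qs.reverse.zip ((qs.map (fun q => pvFill S.toList (PySem.List.len S.toList) q.1 q.2)).reverse)).find?
            (fun qf => qf.1.1 ≤ p.1 && p.1 ≤ qf.1.2) with
        | some qf => qf.2
        | none => String.mk [p.2]))[i]? =
        some (match qs.reverse.find? (fun q => q.1 ≤ (i : Int) && (i : Int) ≤ q.2) with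
        | some q => pvFill S.toList (PySem.List.len S.toList) q.1 q.2
        | none => String.mk [S.toList[i]]) := by
      rw [List.getElem?_map]
      have he : (PySem.List.enumerate S.toList)[i]? = some ((i : Int), S.toList[i]) := by
        rw [PySem.List.getElem?_enumerate]
        simp [hi]
      rw [he, hzip]
      simp only [Option.map_some]
      rw [List.find?_map]
      cases hf : qs.reverse.find? (fun q => q.1 ≤ (i : Int) && (i : Int) ≤ q.2) with
      | some q => simp [Function.comp_def, hf]
      | none => simp [Function.comp_def, hf]
    rw [hBi]
    cases hfind : qs.reverse.find? (fun q => q.1 ≤ (i : Int) && (i : Int) ≤ q.2) with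
    | some p => simp
    | none => simp [List.getElem?_eq_getElem hi]
  · rw [List.getElem?_eq_none (by rw [pv_foldl_paint_length, hs0]; omega),
        List.getElem?_eq_none (by simp only [List.length_map, PySem.List.length_enumerate]; omega)]
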